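-- pv_equiv track=rewrite | github.com/holaymolay/ui-pattern-registry | scripts/check-docs-quality.py | detect_profile
-- ===== SOURCE A (Python) =====
-- def detect_profile(text: str) -> str:
--     if not text.startswith("---\n"):
--         return "rich-human"
--     lines = text.splitlines()
--     end_index = None
--     for i in range(1, len(lines)):
--         if lines[i].strip() == "---":
--             end_index = i
--             break
--     if end_index is None:
--         return "rich-human"
--     for line in lines[1:end_index]:
--         if line.strip().startswith("doc_profile:"):
--             value = line.split(":", 1)[1].strip()
--             return value
--     return "rich-human"
-- ===== SOURCE B (Python) =====
-- def detect_profile(text: str) -> str: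
--     # Single pass: fuse A's find-closing-fence scan and doc_profile scan into one loop.
--     if not text.startswith("---\n"):
--         return "rich-human"
--     profile = None
--     for line in text.splitlines()[1:]:
--         if line.strip() == "---":
--             return profile if profile is not None else "rich-human"
--         if profile is None and line.strip().startswith("doc_profile:"):
--             profile = line.split(":", 1)[1].strip()
--     return "rich-human"
-- ===== Notes on version B (the rewrite author's own statement) =====
-- stated objective: simpler
-- what changed: Fuses A's two scans (find the closing fence, then rescan the frontmatter for doc_profile) into one pass over the lines with a maintained profile accumulator, returning it only when the closing fence is confirmed.
import Mathlib
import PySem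

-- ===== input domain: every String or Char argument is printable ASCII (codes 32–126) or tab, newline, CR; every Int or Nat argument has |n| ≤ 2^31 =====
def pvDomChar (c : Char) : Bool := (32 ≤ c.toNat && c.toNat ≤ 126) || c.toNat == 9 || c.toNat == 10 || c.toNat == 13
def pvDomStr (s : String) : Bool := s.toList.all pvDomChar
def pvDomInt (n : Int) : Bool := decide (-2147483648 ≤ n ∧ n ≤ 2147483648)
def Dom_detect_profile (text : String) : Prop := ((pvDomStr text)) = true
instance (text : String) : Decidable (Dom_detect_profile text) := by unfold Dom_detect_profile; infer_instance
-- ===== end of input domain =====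

-- B fuses A's two scans (find the closing fence, then rescan for doc_profile) into one
-- pass with a maintained accumulator; objective: simpler.

-- shared helpers: the two Pythons use these exact expressions verbatim
def isFence (l : String) : Bool := PySem.Str.strip l == "---"
def isDocProfile (l : String) : Bool :=
  PySem.Str.startswith (PySem.Str.strip l) "doc_profile:"
-- line.split(":", 1)[1].strip()  (the 'none' branches are unreachable when isDocProfile holds)
def extractVal (line : String) : String :=
  match PySem.Str.splitMax? line ":" 1 with
  | none => "rich-human"
  | some parts =>
    match PySem.List.pyGet? parts 1 with
    | none => "rich-human"
    | some v => PySem.Str.strip v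

-- ===== PORT A =====
-- for i in range(1, len(lines)): if lines[i].strip() == "---": end_index = i; break
def findEndLoop (lines : List String) : List Int → Option Int
  | [] => none
  | i :: rest =>
    match PySem.List.pyGet? lines i with
    | none => none
    | some l => if isFence l then some i else findEndLoop lines rest

-- for line in lines[1:end_index]: if …doc_profile…: return value
def scanDoc : List String → String
  | [] => "rich-human"
  | l :: rest => if isDocProfile l then extractVal l else scanDoc rest

def detect_profile (text : String) : String :=
  if !PySem.Str.startswith text "---\n" then "rich-human"
  else
    let lines := PySem.Str.splitlines text
    match findEndLoop lines (PySem.List.pyRange 1 (lines.length : Int) 1) with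
    | none => "rich-human"
    | some e => scanDoc (PySem.List.slice lines (some 1) (some e))

-- ===== PORT B =====
-- single pass with the 'profile' accumulator
def scanFront : List String → Option String → String
  | [], _ => "rich-human"
  | l :: rest, profile =>
    if isFence l then
      match profile with
      | some v => v
      | none => "rich-human"
    else if profile == none && isDocProfile l then
      scanFront rest (some (extractVal l))
    else
      scanFront rest profile

def detect_profile_alt (text : String) : String :=
  if !PySem.Str.startswith text "---\n" then "rich-human"
  else scanFront (PySem.List.slice (PySem.Str.splitlines text) (some 1) none) none

-- ===== PRECONDITION & SPEC =====
def Spec_detect_profile (text : String) (out : String) : Prop := out = detect_profile_alt text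
instance (text : String) (out : String) : Decidable (Spec_detect_profile text out) := by unfold Spec_detect_profile; infer_instance

-- ===== CLAIM (what is proved, stated in full; the proofs are below) =====
def Claim_equal_detect_profile : Prop := ∀ (text : String), Dom_detect_profile text → Spec_detect_profile text (detect_profile text)

-- ===== LEMMAS AND PROOFS =====

-- A's index loop over range(pre.length, len) finds the first fence in the tail t
lemma findEndLoop_eq (t : List String) : ∀ (pre : List String),
    findEndLoop (pre ++ t) (PySem.List.pyRange (pre.length : Int) (((pre ++ t).length : Nat) : Int) 1)
      = (List.findIdx? isFence t).map (fun j => ((pre.length + j : Nat) : Int)) := by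
  induction t with
  | nil =>
    intro pre
    simp [findEndLoop, PySem.List.pyRange_one_eq_nil]
  | cons l rest ih =>
    intro pre
    have hlt : (pre.length : Int) < (((pre ++ l :: rest).length : Nat) : Int) := by
      simp
    rw [PySem.List.pyRange_one_cons hlt]
    have hget : PySem.List.pyGet? (pre ++ l :: rest) (pre.length : Int) = some l := by
      rw [PySem.List.pyGet?_natCast]
      simp
    simp only [findEndLoop, hget]
    by_cases hp : isFence l
    · simp [hp, List.findIdx?_cons]
    · rw [if_neg hp]
      have hrange : PySem.List.pyRange ((pre.length : Int) + 1) (((pre ++ l :: rest).length : Nat) : Int) 1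
          = PySem.List.pyRange (((pre ++ [l]).length : Nat) : Int) ((((pre ++ [l]) ++ rest).length : Nat) : Int) 1 := by
        congr 1 <;> simp
      have hlist : pre ++ l :: rest = (pre ++ [l]) ++ rest := by simp
      rw [hrange, hlist, ih (pre ++ [l])]
      cases h : List.findIdx? isFence rest with
      | none => simp [List.findIdx?_cons, hp, h]
      | some j =>
        simp [List.findIdx?_cons, hp, h]
        omega

-- once a value is recorded, B returns it iff a closing fence exists
lemma scanFront_some (rest : List String) (v : String) :
    scanFront rest (some v)
      = (match List.findIdx? isFence rest with
         | some _ => v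
         | none => "rich-human") := by
  induction rest with
  | nil => simp [scanFront]
  | cons l r ih =>
    by_cases hp : isFence l
    · simp [scanFront, hp, List.findIdx?_cons]
    · simp only [scanFront, hp, List.findIdx?_cons, Bool.false_eq_true,
        if_false, Option.some_beq_none]
      simp only [Bool.false_and, ih]
      cases List.findIdx? isFence r <;> simp

-- the fused single pass equals "find the fence, then rescan the prefix"
lemma scanFront_none (t : List String) :
    (match List.findIdx? isFence t with
     | none => "rich-human"
     | some j => scanDoc (t.take j)) = scanFront t none := by
  induction t with
  | nil => simp [scanFront]
  | cons l rest ih =>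
    by_cases hp : isFence l
    · simp [scanFront, hp, List.findIdx?_cons, scanDoc]
    · by_cases hq : isDocProfile l
      · simp only [scanFront, hp, List.findIdx?_cons, Bool.false_eq_true, if_false,
          Option.none_beq_none, Bool.true_and, hq, if_true, scanFront_some]
        cases h : List.findIdx? isFence rest with
        | none => simp
        | some j => simp [scanDoc, hq]
      · simp only [scanFront, hp, List.findIdx?_cons, Bool.false_eq_true, if_false,
          Option.none_beq_none, Bool.true_and, hq, ← ih]
        cases h : List.findIdx? isFence rest with
        | none => simp
        | some j => simp [scanDoc, hq]

-- ===== VERDICT (by name: the statement is the Claim_ definition above) =====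
theorem detect_profile_spec : Claim_equal_detect_profile := by
  intro text _
  unfold Spec_detect_profile detect_profile detect_profile_alt
  cases hs : PySem.Str.startswith text "---\n" with
  | false => simp
  | true =>
    simp only [Bool.not_true, Bool.false_eq_true, if_false]
    rw [PySem.List.slice_from_one]
    cases hl : PySem.Str.splitlines text with
    | nil => simp [findEndLoop, PySem.List.pyRange_one_eq_nil, scanFront]
    | cons l0 t =>
      have hfe := findEndLoop_eq t [l0]
      simp only [List.singleton_append, List.length_singleton, Nat.cast_one] at hfe
      simp only [List.tail_cons]
      rw [hfe]
      cases h : List.findIdx? isFence t with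
      | none => rw [← scanFront_none t, h]; simp
      | some j =>
        simp only [Option.map_some]
        have hsl : PySem.List.slice (l0 :: t) (some (((1:Nat)):Int)) (some (((1 + j : Nat)):Int)) = t.take j := by
          rw [PySem.List.slice_natCast]; simp
        rw [show ((1:Int)) = (((1:Nat)):Int) from by norm_num, hsl]
        rw [← scanFront_none t, h]
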